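-- pv_equiv track=rewrite | github.com/Riya999786/Python | Learning Python The Hard Way/Projects/Ex48/Ex48/lexicon.py | scan
-- ===== SOURCE A (Python) =====
-- LEXICON = dict(
--     direction = ["north", "south", "east", "west",
--                 "down", "up", "left", "right", "back"],
--     verb = ["go", "stop", "kill", "eat"],
--     stop = ["the", "in", "of", "from", "at", "it"],
--     noun = ["door", "bear", "princess", "cabinet"],
--     number = [i for i in range(10)]
-- )
--
-- def scan(words):
--     result = []
--
--     for word in words.split():
--         found_category = 'error'
--         for category, category_lexicon in LEXICON.items():
--             if word in category_lexicon:
--                 found_category = category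
--                 break
--
--         result.append((found_category, word))
--
--     return result
-- ===== SOURCE B (Python) =====
-- # reverse lookup table, written out flat: word -> category
-- WORD_TO_CATEGORY = {
--     "north": "direction", "south": "direction", "east": "direction",
--     "west": "direction", "down": "direction", "up": "direction",
--     "left": "direction", "right": "direction", "back": "direction",
--     "go": "verb", "stop": "verb", "kill": "verb", "eat": "verb",
--     "the": "stop", "in": "stop", "of": "stop", "from": "stop",
--     "at": "stop", "it": "stop",
--     "door": "noun", "bear": "noun", "princess": "noun", "cabinet": "noun",
-- }
--
--
-- def scan(words):
--     # single fused pass over the characters: tokenize and classify in one sweep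
--     result = []
--     buf = []
--     for c in words + " ":
--         if c.isspace():
--             if buf:
--                 word = "".join(buf)
--                 result.append((WORD_TO_CATEGORY.get(word, "error"), word))
--                 buf = []
--         else:
--             buf.append(c)
--     return result
-- ===== Notes on version B (the rewrite author's own statement) =====
-- stated objective: alternative
-- what changed: B drops words.split() and the inner per-category membership scan entirely: one fused character-level pass accumulates each token in a buffer and, at every whitespace boundary, classifies it by a reverse word-to-category table built once at module load.
import Mathlib
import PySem

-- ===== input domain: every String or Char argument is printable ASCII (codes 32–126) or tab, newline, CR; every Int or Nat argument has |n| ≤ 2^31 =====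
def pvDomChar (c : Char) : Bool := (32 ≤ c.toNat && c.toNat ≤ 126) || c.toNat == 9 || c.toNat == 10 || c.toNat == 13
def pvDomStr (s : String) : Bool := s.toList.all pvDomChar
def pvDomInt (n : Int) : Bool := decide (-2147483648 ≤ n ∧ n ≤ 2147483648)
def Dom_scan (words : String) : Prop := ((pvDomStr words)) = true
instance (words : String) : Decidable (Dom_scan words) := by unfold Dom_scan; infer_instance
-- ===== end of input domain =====

-- B replaces split() + per-token inner scan over categories by one fused character-level
-- pass (buffer tokens, classify at each whitespace boundary via a table built once); same return value.

-- ===== PORT A =====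
-- LEXICON.items() in insertion order. The "number" entry holds the ints 0..9; a string token
-- is never equal to an int in Python, so its membership test is always False — modelled exactly
-- by an empty string list for that category.
def lexiconItemsA : List (String × List String) :=
  [("direction", ["north", "south", "east", "west", "down", "up", "left", "right", "back"]),
   ("verb", ["go", "stop", "kill", "eat"]),
   ("stop", ["the", "in", "of", "from", "at", "it"]),
   ("noun", ["door", "bear", "princess", "cabinet"]),
   ("number", [])]

-- the inner 'for category, category_lexicon in LEXICON.items(): if word in …: …; break'
def findCategoryA (word : String) : List (String × List String) → String
  | [] => "error"
  | (category, categoryLexicon) :: rest =>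
      if word ∈ categoryLexicon then category else findCategoryA word rest

def scan (words : String) : List (String × String) :=
  (PySem.Str.split₀ words).foldl
    (fun result word => result ++ [(findCategoryA word lexiconItemsA, word)]) []

-- ===== PORT B =====
-- B's flat literal dict word -> category (a Python dict literal = inserts in written order)
def wordToCategory : PySem.Dict String String :=
  [("north", "direction"), ("south", "direction"), ("east", "direction"),
   ("west", "direction"), ("down", "direction"), ("up", "direction"),
   ("left", "direction"), ("right", "direction"), ("back", "direction"),
   ("go", "verb"), ("stop", "verb"), ("kill", "verb"), ("eat", "verb"),
   ("the", "stop"), ("in", "stop"), ("of", "stop"), ("from", "stop"),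
   ("at", "stop"), ("it", "stop"),
   ("door", "noun"), ("bear", "noun"), ("princess", "noun"), ("cabinet", "noun")
  ].foldl (fun d p => d.insert p.1 p.2) PySem.Dict.empty

-- the fused loop body: state = (result, buf); 'for c in words + " "'
def scanAltStep (st : List (String × String) × List Char) (c : Char) :
    List (String × String) × List Char :=
  if PySem.Chars.isspace c then
    if st.2.isEmpty then st
    else
      (st.1 ++ [(wordToCategory.getD (String.ofList st.2) "error", String.ofList st.2)], [])
  else (st.1, st.2 ++ [c])

def scan_alt (words : String) : List (String × String) :=
  ((words.toList ++ [' ']).foldl scanAltStep ([], [])).1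

-- ===== PRECONDITION & SPEC =====
def Spec_scan (words : String) (out : List (String × String)) : Prop := out = scan_alt words
instance (words : String) (out : List (String × String)) : Decidable (Spec_scan words out) := by unfold Spec_scan; infer_instance

-- ===== CLAIM (what is proved, stated in full; the proofs are below) =====
def Claim_equal_scan : Prop := ∀ (words : String), Dom_scan words → Spec_scan words (scan words)

-- ===== LEMMAS AND PROOFS =====

-- per-word agreement: A's first-matching-category scan equals B's table lookup
theorem findCategory_eq_lookup (w : String) :
    findCategoryA w lexiconItemsA = wordToCategory.getD w "error" := by
  by_cases h0 : w = "north"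
  · subst h0; decide
  by_cases h1 : w = "south"
  · subst h1; decide
  by_cases h2 : w = "east"
  · subst h2; decide
  by_cases h3 : w = "west"
  · subst h3; decide
  by_cases h4 : w = "down"
  · subst h4; decide
  by_cases h5 : w = "up"
  · subst h5; decide
  by_cases h6 : w = "left"
  · subst h6; decide
  by_cases h7 : w = "right"
  · subst h7; decide
  by_cases h8 : w = "back"
  · subst h8; decide
  by_cases h9 : w = "go"
  · subst h9; decide
  by_cases h10 : w = "stop"
  · subst h10; decide
  by_cases h11 : w = "kill"
  · subst h11; decide
  by_cases h12 : w = "eat"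
  · subst h12; decide
  by_cases h13 : w = "the"
  · subst h13; decide
  by_cases h14 : w = "in"
  · subst h14; decide
  by_cases h15 : w = "of"
  · subst h15; decide
  by_cases h16 : w = "from"
  · subst h16; decide
  by_cases h17 : w = "at"
  · subst h17; decide
  by_cases h18 : w = "it"
  · subst h18; decide
  by_cases h19 : w = "door"
  · subst h19; decide
  by_cases h20 : w = "bear"
  · subst h20; decide
  by_cases h21 : w = "princess"
  · subst h21; decide
  by_cases h22 : w = "cabinet"
  · subst h22; decide
  simp only [wordToCategory, List.foldl]
  simp [findCategoryA, lexiconItemsA, PySem.Dict.getD_insert, PySem.Dict.getD_empty, h0, h1,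
    h2, h3, h4, h5, h6, h7, h8, h9, h10, h11, h12, h13, h14, h15, h16, h17, h18, h19, h20,
    h21, h22]

theorem foldl_append_eq_map (l : List String) (f : String → String × String) :
    l.foldl (fun r w => r ++ [f w]) [] = l.map f := by
  have h : ∀ (l : List String) (acc : List (String × String)),
      l.foldl (fun r w => r ++ [f w]) acc = acc ++ l.map f := by
    intro l; induction l with
    | nil => simp [List.foldl]
    | cons x xs ih => intro acc; simp [List.foldl, ih]
  simpa using h l []

-- the pair returned by B for a completed token
def emitB (t : List Char) : String × String :=
  (wordToCategory.getD (String.ofList t) "error", String.ofList t)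

-- split₀.go's accumulator distributes
theorem split₀_go_acc (cs : List Char) :
    ∀ (cur : List Char) (acc : List (List Char)),
      PySem.Chars.split₀.go cs cur acc =
        acc.reverse ++ PySem.Chars.split₀.go cs cur [] := by
  induction cs with
  | nil =>
      intro cur acc
      simp only [PySem.Chars.split₀.go]
      by_cases h : cur.isEmpty <;> simp [h]
  | cons c rest ih =>
      intro cur acc
      simp only [PySem.Chars.split₀.go]
      by_cases hs : PySem.Chars.isspace c
      · by_cases hc : cur.isEmpty
        · simp only [hs, hc, if_true]
          exact ih [] acc
        · simp only [hs, hc, if_true, Bool.false_eq_true, if_false]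
          rw [ih [] (cur.reverse :: acc), ih [] [cur.reverse]]
          simp
      · simp only [hs, Bool.false_eq_true, if_false]
        exact ih (c :: cur) acc

-- fused pass = map emitB over split₀.go
theorem scanAlt_go (cs : List Char) :
    ∀ (buf : List Char) (res : List (String × String)),
      ((cs ++ [' ']).foldl scanAltStep (res, buf)).1 =
        res ++ (PySem.Chars.split₀.go cs buf.reverse []).map emitB := by
  induction cs with
  | nil =>
      intro buf res
      simp only [List.nil_append, List.foldl_cons, List.foldl_nil, scanAltStep,
        PySem.Chars.split₀.go]
      have hsp : PySem.Chars.isspace ' ' = true := by decide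
      by_cases hb : buf.isEmpty
      · simp [hsp, List.isEmpty_iff.mp hb]
      · have : buf.reverse.isEmpty = false := by
          simp only [List.isEmpty_iff] at *; simp [hb]
        simp [hsp, hb, this, emitB]
  | cons c rest ih =>
      intro buf res
      simp only [List.cons_append, List.foldl_cons, PySem.Chars.split₀.go]
      by_cases hs : PySem.Chars.isspace c
      · by_cases hb : buf.isEmpty
        · have hbe : buf = [] := List.isEmpty_iff.mp hb
          have hre : buf.reverse.isEmpty = true := by simp [hbe]
          simp only [scanAltStep, hs, hb, if_true, hre]
          rw [show (PySem.Chars.isspace c = true) = True from by simp [hs]] at *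
          simpa [hbe] using ih [] res
        · have hre : buf.reverse.isEmpty = false := by
            simp only [List.isEmpty_iff] at *; simp [hb]
          simp only [scanAltStep, hs, hb, if_true, hre, Bool.false_eq_true, if_false]
          rw [ih [] (res ++ [(wordToCategory.getD (String.ofList buf) "error",
            String.ofList buf)]),
            split₀_go_acc rest [] [buf.reverse.reverse]]
          simp [emitB]
      · simp only [scanAltStep, hs, Bool.false_eq_true, if_false]
        rw [ih (buf ++ [c]) res]
        simp

-- ===== VERDICT (by name: the statement is the Claim_ definition above) =====
theorem scan_spec : Claim_equal_scan := by
  intro words _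
  unfold Spec_scan scan scan_alt
  rw [foldl_append_eq_map]
  have h := scanAlt_go words.toList [] []
  simp only [List.reverse_nil] at h
  rw [h]
  simp only [PySem.Str.split₀, PySem.Chars.split₀, List.map_map]
  exact List.map_congr_left fun t _ => by
    simp [emitB, findCategory_eq_lookup]
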